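-- pv_equiv track=rewrite | github.com/AlexanderRay8/AdventOfCode | 2021/day3/day3.py | find_least_candidates
-- ===== SOURCE A (Python) =====
-- def count_bits_at_pos(bitpos:int, numlist: list):
--     zero_amt = 0
--     one_amt = 0
--
--     for num in numlist:
--         if num[bitpos] == '0':
--             zero_amt += 1
--         if num[bitpos] == '1':
--             one_amt += 1
--
--     return (zero_amt, one_amt)
--
-- def find_least_candidates(bitpos:int, numlist: list):
--     zero_amt, one_amt = count_bits_at_pos(bitpos, numlist)
--     new_list = []
--     bit = '0'
--     if one_amt < zero_amt:
--         bit = '1'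
--
--     for num in numlist:
--         if num[bitpos] == bit:
--             new_list.append(num)
--
--     return new_list
-- ===== SOURCE B (Python) =====
-- def find_least_candidates(bitpos: int, numlist: list):
--     zeros = []
--     ones = []
--     for num in numlist:
--         c = num[bitpos]
--         if c == '0':
--             zeros.append(num)
--         elif c == '1':
--             ones.append(num)
--     return ones if len(ones) < len(zeros) else zeros
-- ===== Notes on version B (the rewrite author's own statement) =====
-- stated objective: simpler
-- what changed: Single pass partitioning strings into a zeros and a ones list, then returning the shorter ones list (zeros on ties) by comparing list lengths, instead of a separate counting pass followed by a second filtering pass.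
import Mathlib
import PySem

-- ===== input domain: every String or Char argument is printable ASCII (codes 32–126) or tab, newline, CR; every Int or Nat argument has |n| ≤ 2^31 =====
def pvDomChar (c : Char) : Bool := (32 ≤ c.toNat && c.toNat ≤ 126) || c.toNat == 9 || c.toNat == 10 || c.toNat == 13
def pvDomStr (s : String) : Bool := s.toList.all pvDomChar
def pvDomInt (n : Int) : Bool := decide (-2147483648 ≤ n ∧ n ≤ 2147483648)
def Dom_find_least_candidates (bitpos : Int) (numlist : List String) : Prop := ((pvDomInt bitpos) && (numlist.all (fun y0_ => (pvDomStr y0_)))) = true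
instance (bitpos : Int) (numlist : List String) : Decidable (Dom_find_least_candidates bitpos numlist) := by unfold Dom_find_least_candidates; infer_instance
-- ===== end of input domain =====

-- B partitions the strings into a zeros list and a ones list in one pass and returns
-- the strictly shorter ones list (zeros on ties), replacing A's count-then-filter two passes; objective: simpler.
-- ===== PORT A =====
def count_bits_at_pos (bitpos : Int) (numlist : List String) : Int × Int :=
  numlist.foldl (fun acc num =>
    let zero_amt := if PySem.List.pyGetD num.toList bitpos ' ' = '0' then acc.1 + 1 else acc.1
    let one_amt := if PySem.List.pyGetD num.toList bitpos ' ' = '1' then acc.2 + 1 else acc.2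
    (zero_amt, one_amt)) (0, 0)

def find_least_candidates (bitpos : Int) (numlist : List String) : List String :=
  let counts := count_bits_at_pos bitpos numlist
  let bit : Char := if counts.2 < counts.1 then '1' else '0'
  numlist.foldl (fun new_list num =>
    if PySem.List.pyGetD num.toList bitpos ' ' = bit then new_list ++ [num] else new_list) []

-- ===== PORT B =====
def find_least_candidates_alt (bitpos : Int) (numlist : List String) : List String :=
  let p := numlist.foldl (fun (acc : List String × List String) num =>
    let c := PySem.List.pyGetD num.toList bitpos ' '
    if c = '0' then (acc.1 ++ [num], acc.2)
    else if c = '1' then (acc.1, acc.2 ++ [num])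
    else acc) ([], [])
  if p.2.length < p.1.length then p.2 else p.1

-- ===== PRECONDITION & SPEC =====
-- Pre_ excludes exactly the inputs where num[bitpos] raises IndexError in Python.
def Pre_find_least_candidates (bitpos : Int) (numlist : List String) : Prop :=
  ∀ num ∈ numlist, PySem.Raise.InRange num.toList.length bitpos
instance (bitpos : Int) (numlist : List String) : Decidable (Pre_find_least_candidates bitpos numlist) := by unfold Pre_find_least_candidates; infer_instance
def pvWitness_find_least_candidates : Int × List String := (0, ["01", "10", "11"])
def Spec_find_least_candidates (bitpos : Int) (numlist : List String) (out : List String) : Prop := out = find_least_candidates_alt bitpos numlist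
instance (bitpos : Int) (numlist : List String) (out : List String) : Decidable (Spec_find_least_candidates bitpos numlist out) := by unfold Spec_find_least_candidates; infer_instance

-- ===== CLAIM (what is proved, stated in full; the proofs are below) =====
def Claim_equal_find_least_candidates : Prop := ∀ (bitpos : Int) (numlist : List String), Dom_find_least_candidates bitpos numlist → Pre_find_least_candidates bitpos numlist → Spec_find_least_candidates bitpos numlist (find_least_candidates bitpos numlist)

-- ===== LEMMAS AND PROOFS =====
-- A's counting loop computes the two countP's.
theorem count_bits_foldl (bitpos : Int) (numlist : List String) (a b : Int) :
    numlist.foldl (fun acc num =>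
      let zero_amt := if PySem.List.pyGetD num.toList bitpos ' ' = '0' then acc.1 + 1 else acc.1
      let one_amt := if PySem.List.pyGetD num.toList bitpos ' ' = '1' then acc.2 + 1 else acc.2
      (zero_amt, one_amt)) (a, b)
    = (a + (numlist.countP (fun num => PySem.List.pyGetD num.toList bitpos ' ' = '0')),
       b + (numlist.countP (fun num => PySem.List.pyGetD num.toList bitpos ' ' = '1'))) := by
  induction numlist generalizing a b with
  | nil => simp
  | cons x xs ih =>
      simp only [List.foldl_cons, List.countP_cons, ih]
      by_cases h0 : PySem.List.pyGetD x.toList bitpos ' ' = '0' <;>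
        by_cases h1 : PySem.List.pyGetD x.toList bitpos ' ' = '1' <;>
        simp [h0, h1] <;> omega

-- B's partitioning loop computes the two filters.
theorem partition_foldl (bitpos : Int) (numlist : List String) (zs os : List String) :
    numlist.foldl (fun (acc : List String × List String) num =>
      let c := PySem.List.pyGetD num.toList bitpos ' '
      if c = '0' then (acc.1 ++ [num], acc.2)
      else if c = '1' then (acc.1, acc.2 ++ [num])
      else acc) (zs, os)
    = (zs ++ numlist.filter (fun num => PySem.List.pyGetD num.toList bitpos ' ' = '0'),
       os ++ numlist.filter (fun num => PySem.List.pyGetD num.toList bitpos ' ' = '1')) := by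
  induction numlist generalizing zs os with
  | nil => simp
  | cons x xs ih =>
      simp only [List.foldl_cons, List.filter_cons]
      by_cases h0 : PySem.List.pyGetD x.toList bitpos ' ' = '0'
      · have h1 : ¬ PySem.List.pyGetD x.toList bitpos ' ' = '1' := by simp [h0]
        simp [h0, ih]
      · by_cases h1 : PySem.List.pyGetD x.toList bitpos ' ' = '1' <;> simp [h0, h1, ih]

-- ===== VERDICT (by name: the statement is the Claim_ definition above) =====
theorem find_least_candidates_spec : Claim_equal_find_least_candidates := by
  unfold Claim_equal_find_least_candidates
  intro bitpos numlist _ _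
  unfold Spec_find_least_candidates find_least_candidates find_least_candidates_alt count_bits_at_pos
  rw [count_bits_foldl, partition_foldl]
  simp only [List.nil_append, zero_add, ← List.countP_eq_length_filter]
  by_cases h : (numlist.countP (fun num => PySem.List.pyGetD num.toList bitpos ' ' = '1'))
      < (numlist.countP (fun num => PySem.List.pyGetD num.toList bitpos ' ' = '0'))
  · have h' : ((numlist.countP (fun num => PySem.List.pyGetD num.toList bitpos ' ' = '1')) : Int)
        < ((numlist.countP (fun num => PySem.List.pyGetD num.toList bitpos ' ' = '0')) : Int) := by
      exact_mod_cast h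
    simp only [h', if_pos]
    rw [if_pos h]
    simpa using PySem.List.foldl_append_if
      (fun num => decide (PySem.List.pyGetD num.toList bitpos ' ' = '1')) id numlist []
  · have h' : ¬ ((numlist.countP (fun num => PySem.List.pyGetD num.toList bitpos ' ' = '1')) : Int)
        < ((numlist.countP (fun num => PySem.List.pyGetD num.toList bitpos ' ' = '0')) : Int) := by
      exact_mod_cast h
    simp only [h', if_false]
    rw [if_neg h]
    simpa using PySem.List.foldl_append_if
      (fun num => decide (PySem.List.pyGetD num.toList bitpos ' ' = '0')) id numlist []
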